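-- pv_equiv track=rewrite | github.com/LeiaInc/TranslatorBot | .github/actions/action-gtranslate/gtranslate.py | parse_chinese_word
-- ===== SOURCE A (Python) =====
-- def parse_chinese_word(chinese_string):
--     str_length = len(chinese_string)
--     s = chinese_string
--     for i, v in enumerate(chinese_string):
--         if (v == 's') | (v == 'd') & (str_length > 1):
--             splitPos = i + 1
--             l,r = chinese_string[:splitPos], chinese_string[splitPos:]
--             s = l+ " " +r
--     return s
-- ===== SOURCE B (Python) =====
-- def parse_chinese_word(chinese_string):
--     s_pos = chinese_string.rfind('s')
--     d_pos = chinese_string.rfind('d') if len(chinese_string) > 1 else -1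
--     pos = max(s_pos, d_pos)
--     if pos == -1:
--         return chinese_string
--     return chinese_string[:pos + 1] + ' ' + chinese_string[pos + 1:]
-- ===== Notes on version B (the rewrite author's own statement) =====
-- stated objective: faster
-- what changed: Replaces the left-to-right scan that rebuilds a full split string at every matching character with two right-anchored str.rfind searches combined by max and one final split.
import Mathlib
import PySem

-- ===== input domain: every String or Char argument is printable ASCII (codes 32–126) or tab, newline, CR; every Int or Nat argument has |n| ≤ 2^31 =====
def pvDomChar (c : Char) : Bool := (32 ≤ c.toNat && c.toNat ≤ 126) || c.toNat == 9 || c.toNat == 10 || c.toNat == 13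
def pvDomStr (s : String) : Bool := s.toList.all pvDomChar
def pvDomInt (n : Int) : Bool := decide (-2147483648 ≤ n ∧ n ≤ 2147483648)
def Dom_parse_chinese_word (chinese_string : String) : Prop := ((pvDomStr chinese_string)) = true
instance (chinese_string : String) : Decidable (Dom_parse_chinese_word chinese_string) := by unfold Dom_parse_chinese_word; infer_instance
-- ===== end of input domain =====

-- B replaces A's left-to-right re-splitting scan by two right-anchored rfind searches combined
-- with max and a single final split (objective: idiomatic).

-- ===== PORT A =====
def parse_chinese_word (chinese_string : String) : String :=
  let str_length : Int := PySem.Str.len chinese_string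
  let s := chinese_string
  (PySem.List.enumerate chinese_string.toList 0).foldl
    (fun s iv =>
      if (iv.2 == 's') || ((iv.2 == 'd') && decide (str_length > 1)) then
        let splitPos : Int := iv.1 + 1
        let l := PySem.Str.slice chinese_string none (some splitPos)
        let r := PySem.Str.slice chinese_string (some splitPos) none
        l ++ " " ++ r
      else s) s

-- ===== PORT B =====
def parse_chinese_word_alt (chinese_string : String) : String :=
  let s_pos : Int := PySem.Str.rfind chinese_string "s"
  let d_pos : Int :=
    if PySem.Str.len chinese_string > 1 then PySem.Str.rfind chinese_string "d" else -1
  let pos : Int := max s_pos d_pos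
  if pos == -1 then chinese_string
  else
    PySem.Str.slice chinese_string none (some (pos + 1)) ++ " " ++
      PySem.Str.slice chinese_string (some (pos + 1)) none

-- ===== PRECONDITION & SPEC =====
def Spec_parse_chinese_word (chinese_string : String) (out : String) : Prop :=
  out = parse_chinese_word_alt chinese_string
instance (chinese_string : String) (out : String) : Decidable (Spec_parse_chinese_word chinese_string out) := by
  unfold Spec_parse_chinese_word; infer_instance

-- ===== CLAIM (what is proved, stated in full; the proofs are below) =====
def Claim_equal_parse_chinese_word : Prop := ∀ (chinese_string : String), Dom_parse_chinese_word chinese_string → Spec_parse_chinese_word chinese_string (parse_chinese_word chinese_string)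

-- ===== LEMMAS AND PROOFS =====

-- last index i ≤ k with p (cs[i]) (as an Int), or -1 if there is none
def lastHit (p : Char → Bool) (cs : List Char) : Nat → Int
  | 0 => if cs[0]?.any p then 0 else -1
  | (j+1) => if cs[j+1]?.any p then ((j : Int) + 1) else lastHit p cs j

theorem lastHit_zero (p : Char → Bool) (cs : List Char) :
    lastHit p cs 0 = if cs[0]?.any p then 0 else -1 := rfl

theorem lastHit_succ (p : Char → Bool) (cs : List Char) (j : Nat) :
    lastHit p cs (j+1) = if cs[j+1]?.any p then ((j : Int) + 1) else lastHit p cs j := rfl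

theorem lastHit_ge (p : Char → Bool) (cs : List Char) (k : Nat) : -1 ≤ lastHit p cs k := by
  induction k with
  | zero => rw [lastHit_zero]; split <;> omega
  | succ j ih => rw [lastHit_succ]; split <;> omega

theorem lastHit_le (p : Char → Bool) (cs : List Char) (k : Nat) : lastHit p cs k ≤ k := by
  induction k with
  | zero => rw [lastHit_zero]; split <;> omega
  | succ j ih => rw [lastHit_succ]; split <;> omega

theorem isPrefixOf_singleton (a : Char) (l : List Char) :
    [a].isPrefixOf l = (l[0]?.any (· == a)) := by
  cases l <;> simp [List.isPrefixOf, eq_comm]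

theorem go_eq_lastHit (cs : List Char) (a : Char) (k : Nat) :
    PySem.Chars.rfind.go cs [a] k = lastHit (· == a) cs k := by
  induction k with
  | zero =>
      simp only [PySem.Chars.rfind.go, lastHit_zero, isPrefixOf_singleton]
  | succ j ih =>
      rw [lastHit_succ, ← ih]
      simp only [PySem.Chars.rfind.go, isPrefixOf_singleton]
      rw [List.getElem?_drop]
      norm_cast

theorem rfind_single (cs : List Char) (a : Char) :
    PySem.Chars.rfind cs [a] = lastHit (· == a) cs cs.length := by
  simp [PySem.Chars.rfind, go_eq_lastHit]

theorem max_lastHit (p q : Char → Bool) (cs : List Char) (k : Nat) :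
    max (lastHit p cs k) (lastHit q cs k) = lastHit (fun c => p c || q c) cs k := by
  induction k with
  | zero =>
      simp only [lastHit_zero]
      cases h : cs[0]? with
      | none => simp
      | some c => by_cases hp : p c <;> by_cases hq : q c <;> simp [hp, hq]
  | succ j ih =>
      simp only [lastHit_succ]
      cases h : cs[j+1]? with
      | none => simpa using ih
      | some c =>
        by_cases hp : p c <;> by_cases hq : q c <;> simp [hp, hq, ih]
        all_goals
          have h1 := lastHit_le p cs j
          have h2 := lastHit_le q cs j
          omega

theorem lastHit_append_left (p : Char → Bool) (xs ys : List Char) :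
    ∀ j : Nat, j < xs.length → lastHit p (xs ++ ys) j = lastHit p xs j := by
  intro j
  induction j with
  | zero => intro h; rw [lastHit_zero, lastHit_zero, List.getElem?_append_left (by omega)]
  | succ j ih =>
      intro h
      rw [lastHit_succ, lastHit_succ, List.getElem?_append_left (by omega), ih (by omega)]

theorem lastHit_snoc (p : Char → Bool) (xs : List Char) (c : Char) :
    lastHit p (xs ++ [c]) (xs.length + 1) =
      if p c then ((xs.length : Nat) : Int) else lastHit p xs xs.length := by
  rw [lastHit_succ, List.getElem?_eq_none (by simp)]
  simp only [Option.any_none, Bool.false_eq_true, if_false]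
  cases hxs : xs.length with
  | zero =>
      have hx : xs = [] := List.eq_nil_of_length_eq_zero hxs
      subst hx
      simp [lastHit_zero]
  | succ m =>
      have h2 : (xs ++ [c])[m+1]? = some c := by
        rw [← hxs]; simp
      rw [lastHit_succ, h2]
      simp only [Option.any_some]
      by_cases hp : p c
      · simp [hp]
      · simp only [hp, Bool.false_eq_true, if_false]
        rw [lastHit_append_left p xs [c] m (by omega)]
        conv_rhs => rw [lastHit_succ, List.getElem?_eq_none (by omega)]
        simp

-- the general shape of A's loop: the last matching index wins
theorem foldA (P : Char → Bool) (g : Int → String) (xs : List Char) :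
    ∀ acc : String,
      (PySem.List.enumerate xs 0).foldl (fun s iv => if P iv.2 then g (iv.1 + 1) else s) acc =
        if lastHit P xs xs.length = -1 then acc else g (lastHit P xs xs.length + 1) := by
  induction xs using List.reverseRecOn with
  | nil => intro acc; simp [PySem.List.enumerate_nil, lastHit]
  | append_singleton xs c ih =>
      intro acc
      rw [PySem.List.enumerate_append]
      simp only [List.foldl_append, PySem.List.enumerate_cons, PySem.List.enumerate_nil,
        List.foldl_cons, List.foldl_nil, zero_add, List.length_append, List.length_cons,
        List.length_nil]
      rw [lastHit_snoc, ih acc]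
      by_cases hp : P c
      · have : ((xs.length : Nat) : Int) ≠ -1 := by omega
        simp [hp, this]
      · simp [hp]

-- ===== VERDICT (by name: the statement is the Claim_ definition above) =====
theorem parse_chinese_word_spec : Claim_equal_parse_chinese_word := by
  intro str _
  unfold Spec_parse_chinese_word parse_chinese_word parse_chinese_word_alt
  simp only []
  rw [foldA (fun c => (c == 's') || ((c == 'd') && decide (PySem.Str.len str > 1)))
      (fun p => PySem.Str.slice str none (some p) ++ " " ++ PySem.Str.slice str (some p) none)]
  have hlen : PySem.Str.len str = (str.toList.length : Int) := by
    simp [PySem.Str.len]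
  have hs : PySem.Str.rfind str "s" = lastHit (· == 's') str.toList str.toList.length := by
    rw [PySem.Str.rfind_eq]; exact rfind_single str.toList 's'
  have hd : PySem.Str.rfind str "d" = lastHit (· == 'd') str.toList str.toList.length := by
    rw [PySem.Str.rfind_eq]; exact rfind_single str.toList 'd'
  by_cases h1 : PySem.Str.len str > 1
  · have hP : (fun c => (c == 's') || ((c == 'd') && decide (PySem.Str.len str > 1)))
        = (fun c => (c == 's') || (c == 'd')) := by
      funext c
      have h1' : 1 < str.length := by simpa [PySem.Str.len] using h1
      simp [h1']
    rw [hP, if_pos h1, hs, hd, max_lastHit]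
    set L := lastHit (fun c => (c == 's') || (c == 'd')) str.toList str.toList.length with hL
    by_cases h2 : L = -1
    · simp [h2]
    · simp [h2]
  · have hP : (fun c => (c == 's') || ((c == 'd') && decide (PySem.Str.len str > 1)))
        = (fun c => c == 's') := by
      funext c
      have h1' : ¬ 1 < str.length := by simpa [PySem.Str.len] using h1
      simp [h1']
    rw [hP, if_neg h1, hs]
    have hmax : max (lastHit (· == 's') str.toList str.toList.length) (-1 : Int)
        = lastHit (· == 's') str.toList str.toList.length :=
      max_eq_left (lastHit_ge _ _ _)
    rw [hmax]
    set L := lastHit (· == 's') str.toList str.toList.length with hL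
    by_cases h2 : L = -1
    · simp [h2]
    · simp [h2]
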